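-- pv_equiv track=rewrite | github.com/c-schwarze/advent-of-code | year2020/day3/__init__.py | check_trees_hit
-- ===== SOURCE A (Python) =====
-- def check_trees_hit(full_array, horizontal_increment, vertical_increment):
--     horizontal = 0
--     vertical = 0
--     count_trees = 0
--     while vertical < len(full_array):
--         if full_array[vertical][horizontal] == '#':
--             count_trees += 1
--
--         horizontal = (horizontal + horizontal_increment)%len(full_array[0])
--         vertical += vertical_increment
--
--     return count_trees
-- ===== SOURCE B (Python) =====
-- def check_trees_hit(full_array, horizontal_increment, vertical_increment):
--     if not full_array:
--         return 0
--     width = len(full_array[0])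
--     visited = full_array[::vertical_increment]
--     path = "".join(row[(k * horizontal_increment) % width] for k, row in enumerate(visited))
--     return path.count('#')
-- ===== Notes on version B (the rewrite author's own statement) =====
-- stated objective: simpler
-- what changed: Replaces A's single pass with running horizontal/vertical accumulators by three staged passes: select the visited rows with a step slice full_array[::vertical_increment], build the string of visited characters with join over enumerate, and count '#' in it with str.count.
import Mathlib
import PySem

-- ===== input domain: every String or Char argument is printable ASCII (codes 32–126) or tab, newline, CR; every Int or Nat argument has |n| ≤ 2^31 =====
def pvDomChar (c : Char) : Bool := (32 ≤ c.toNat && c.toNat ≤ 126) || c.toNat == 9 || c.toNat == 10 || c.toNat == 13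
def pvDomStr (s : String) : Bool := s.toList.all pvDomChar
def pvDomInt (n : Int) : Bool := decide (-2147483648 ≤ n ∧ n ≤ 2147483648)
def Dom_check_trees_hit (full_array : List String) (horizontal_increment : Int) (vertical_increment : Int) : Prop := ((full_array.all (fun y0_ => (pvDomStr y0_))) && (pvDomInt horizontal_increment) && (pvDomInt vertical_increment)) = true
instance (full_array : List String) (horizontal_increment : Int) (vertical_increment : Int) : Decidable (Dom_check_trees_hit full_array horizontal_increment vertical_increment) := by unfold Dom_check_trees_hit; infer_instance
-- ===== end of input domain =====

-- B replaces A's accumulator loop by three staged passes: a step slice selecting the visited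
-- rows, a joined string of the visited characters, and a character count (objective: simpler).


-- ===== PORT A =====
-- A's while loop as fuel recursion over the state (horizontal, vertical, count_trees);
-- fuel = len(full_array)+1 suffices because under Pre_ the loop runs at most len(full_array) times.
def check_trees_hit_go (fa : List String) (hinc vinc : Int) :
    Nat → Int → Int → Int → Int
  | 0, _, _, count => count
  | fuel+1, hor, vert, count =>
    if vert < (fa.length : Int) then
      let count' :=
        if PySem.List.pyGet? (((PySem.List.pyGet? fa vert).getD "").toList) hor = some '#' then
          count + 1
        else count
      check_trees_hit_go fa hinc vinc fuel
        (PySem.Int.mod (hor + hinc) ((fa.headD "").toList.length : Int))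
        (vert + vinc) count'
    else count

def check_trees_hit (full_array : List String) (horizontal_increment : Int) (vertical_increment : Int) : Int :=
  check_trees_hit_go full_array horizontal_increment vertical_increment (full_array.length + 1) 0 0 0

-- ===== PORT B =====
-- Source B staged: visited = full_array[::vertical_increment] (PySem.List.slice?);
-- path = "".join(row[(k*h)%width] for k, row in enumerate(visited)) — each joined piece is one
-- character, so the join is the list of those characters (exact; under Pre_ every index is in
-- range, so pyGet? is `some` and the `.getD ' '` default is never used); path.count('#') of a
-- one-character needle is the character count PySem.Chars.count path ['#'].
def check_trees_hit_alt (full_array : List String) (horizontal_increment : Int) (vertical_increment : Int) : Int :=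
  if full_array = [] then 0
  else
    let width : Int := ((full_array.headD "").toList.length : Int)
    -- Python raises ValueError on slice step 0 (slice? = none); unreachable under Pre_ (0 < step)
    let visited : List String :=
      (PySem.List.slice? full_array none none vertical_increment).getD []
    let path : List Char :=
      (PySem.List.enumerate visited).map (fun kr =>
        (PySem.List.pyGet? kr.2.toList (PySem.Int.mod (kr.1 * horizontal_increment) width)).getD ' ')
    ((PySem.Chars.count path ['#'] : Nat) : Int)

-- ===== PRECONDITION & SPEC =====
-- Pre_ excludes exactly the inputs on which Python A does not return normally: a non-positive
-- vertical_increment (the while loop never terminates or walks off the left end), an empty first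
-- row (ZeroDivisionError or IndexError), and a visited row too short for the computed column
-- (IndexError).
def Pre_check_trees_hit (full_array : List String) (horizontal_increment : Int) (vertical_increment : Int) : Prop :=
  (full_array.isEmpty ||
    (decide (0 < vertical_increment) &&
     decide (0 < (full_array.headD "").toList.length) &&
     (List.range full_array.length).all (fun k =>
       !decide (k * vertical_increment.toNat < full_array.length) ||
       decide ((PySem.Int.mod ((k : Int) * horizontal_increment)
           ((full_array.headD "").toList.length : Int)).toNat <
         (full_array.getD (k * vertical_increment.toNat) "").toList.length)))) = true
instance (full_array : List String) (horizontal_increment : Int) (vertical_increment : Int) : Decidable (Pre_check_trees_hit full_array horizontal_increment vertical_increment) := by unfold Pre_check_trees_hit; infer_instance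

def pvWitness_check_trees_hit : List String × Int × Int := (["#.#", ".#.", "#.."], 1, 1)

def Spec_check_trees_hit (full_array : List String) (horizontal_increment : Int) (vertical_increment : Int) (out : Int) : Prop := out = check_trees_hit_alt full_array horizontal_increment vertical_increment
instance (full_array : List String) (horizontal_increment : Int) (vertical_increment : Int) (out : Int) : Decidable (Spec_check_trees_hit full_array horizontal_increment vertical_increment out) := by unfold Spec_check_trees_hit; infer_instance

-- ===== CLAIM (what is proved, stated in full; the proofs are below) =====
def Claim_equal_check_trees_hit : Prop := ∀ (full_array : List String) (horizontal_increment : Int) (vertical_increment : Int), Dom_check_trees_hit full_array horizontal_increment vertical_increment → Pre_check_trees_hit full_array horizontal_increment vertical_increment → Spec_check_trees_hit full_array horizontal_increment vertical_increment (check_trees_hit full_array horizontal_increment vertical_increment)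

-- ===== LEMMAS AND PROOFS =====

-- k < ceil(n/v)  ↔  k*v < n   (for 0 < v)
lemma lt_steps_iff (n v k : Int) (hv : 0 < v) :
    k < -(PySem.Int.floordiv (-n) v) ↔ k * v < n := by
  constructor
  · intro hk
    have h1 : PySem.Int.floordiv (-n) v ≤ -(k + 1) := by omega
    by_contra h
    have h2 : (-k) * v ≤ -n := by nlinarith [not_lt.mp h]
    have := (PySem.Int.le_floordiv_iff_mul_le (a := -n) (b := v) (q := -k) hv).mpr h2
    omega
  · intro hk
    by_contra h
    have h1 : -(k + 1) + 1 ≤ PySem.Int.floordiv (-n) v := by omega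
    have h2 := (PySem.Int.le_floordiv_iff_mul_le (a := -n) (b := v) (q := -k) hv).mp (by omega)
    nlinarith

-- the running modular accumulator advances to the closed form at step k+1
lemma mod_step (h w : Int) (hw : 0 < w) (k : Int) :
    PySem.Int.mod (PySem.Int.mod (k * h) w + h) w = PySem.Int.mod ((k + 1) * h) w := by
  rw [PySem.Int.mod_eq_emod_of_pos hw, PySem.Int.mod_eq_emod_of_pos hw,
      PySem.Int.mod_eq_emod_of_pos hw, Int.emod_add_emod]
  ring_nf

lemma loop_eq (fa : List String) (h v : Int) (hv : 0 < v)
    (hw : 0 < ((fa.headD "").toList.length : Int)) :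
    ∀ (fuel : Nat) (k : Nat) (c : Int),
      -(PySem.Int.floordiv (-(fa.length : Int)) v) ≤ (k : Int) + (fuel : Int) →
      check_trees_hit_go fa h v fuel (PySem.Int.mod ((k : Int) * h) ((fa.headD "").toList.length : Int)) ((k : Int) * v) c
        = c + ((PySem.List.pyRange (k : Int) (-(PySem.Int.floordiv (-(fa.length : Int)) v)) 1).map (fun j =>
            if PySem.List.pyGet? (((PySem.List.pyGet? fa (j * v)).getD "").toList)
                (PySem.Int.mod (j * h) ((fa.headD "").toList.length : Int)) = some '#' then (1 : Int) else 0)).sum := by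
  intro fuel
  induction fuel with
  | zero =>
    intro k c hfuel
    have : ¬ ((k : Int) * v < (fa.length : Int)) := by
      intro hlt
      have := (lt_steps_iff (fa.length : Int) v (k : Int) hv).mpr hlt
      omega
    rw [PySem.List.pyRange_one_eq_nil (by omega)]
    simp [check_trees_hit_go]
  | succ fuel ih =>
    intro k c hfuel
    by_cases hk : (k : Int) * v < (fa.length : Int)
    · have hks := (lt_steps_iff (fa.length : Int) v (k : Int) hv).mpr hk
      rw [check_trees_hit_go]
      rw [if_pos hk]
      have hrec := ih (k + 1) (if PySem.List.pyGet? (((PySem.List.pyGet? fa ((k : Int) * v)).getD "").toList)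
          (PySem.Int.mod ((k : Int) * h) ((fa.headD "").toList.length : Int)) = some '#' then c + 1 else c)
          (by push_cast; push_cast at hfuel; omega)
      push_cast at hrec
      show check_trees_hit_go fa h v fuel
          (PySem.Int.mod ((PySem.Int.mod ((k : Int) * h) ((fa.headD "").toList.length : Int)) + h) ((fa.headD "").toList.length : Int))
          ((k : Int) * v + v)
          (if PySem.List.pyGet? (((PySem.List.pyGet? fa ((k : Int) * v)).getD "").toList)
            (PySem.Int.mod ((k : Int) * h) ((fa.headD "").toList.length : Int)) = some '#' then c + 1 else c)
          = c + ((PySem.List.pyRange (k : Int) (-(PySem.Int.floordiv (-(fa.length : Int)) v)) 1).map (fun j =>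
              if PySem.List.pyGet? (((PySem.List.pyGet? fa (j * v)).getD "").toList)
                  (PySem.Int.mod (j * h) ((fa.headD "").toList.length : Int)) = some '#' then (1 : Int) else 0)).sum
      rw [mod_step h _ hw (k : Int), show (k : Int) * v + v = ((k : Int) + 1) * v by ring, hrec,
          PySem.List.pyRange_one_cons hks]
      simp only [List.map_cons, List.sum_cons]
      split_ifs <;> ring
    · have hks : ¬ ((k : Int) < -(PySem.Int.floordiv (-(fa.length : Int)) v)) := by
        intro hlt; exact hk ((lt_steps_iff _ v _ hv).mp hlt)
      rw [check_trees_hit_go, if_neg hk, PySem.List.pyRange_one_eq_nil (by omega)]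
      simp

lemma steps_le (n v : Int) (hn : 0 ≤ n) (hv : 0 < v) :
    -(PySem.Int.floordiv (-n) v) ≤ n + 1 := by
  have h2 : (-(n + 1)) * v ≤ -n := by nlinarith
  have := (PySem.Int.le_floordiv_iff_mul_le (a := -n) (b := v) (q := -(n + 1)) hv).mpr h2
  omega

-- the ceiling A's loop takes, as a Nat
lemma ceil_steps (n m : Nat) (hm : 0 < m) :
    -(PySem.Int.floordiv (-(n : Int)) (m : Int)) = (((n + m - 1) / m : Nat) : Int) := by
  rw [PySem.Int.neg_floordiv_neg_eq_iff_of_pos (by exact_mod_cast hm : (0:Int) < (m:Int))]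
  have hub : (n + m - 1) / m * m ≤ n + m - 1 := Nat.div_mul_le_self _ _
  have hlb : n + m - 1 < m * ((n + m - 1) / m + 1) := Nat.lt_mul_div_succ _ hm
  have h0 : ((n + m - 1 : Nat) : Int) = (n : Int) + m - 1 := by omega
  have hub' : (((n + m - 1) / m : Nat) : Int) * m ≤ (n : Int) + m - 1 := by
    calc (((n + m - 1) / m : Nat) : Int) * m
        = (((n + m - 1) / m * m : Nat) : Int) := by push_cast; ring
      _ ≤ ((n + m - 1 : Nat) : Int) := by exact_mod_cast hub
      _ = (n : Int) + m - 1 := h0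
  have hlb' : (n : Int) + m - 1 < (((n + m - 1) / m : Nat) : Int) * m + m := by
    calc (n : Int) + m - 1 = ((n + m - 1 : Nat) : Int) := h0.symm
      _ < ((m * ((n + m - 1) / m + 1) : Nat) : Int) := by exact_mod_cast hlb
      _ = (((n + m - 1) / m : Nat) : Int) * m + m := by push_cast; ring
  have hm' : (1 : Int) ≤ (m : Int) := by exact_mod_cast hm
  constructor
  · nlinarith
  · nlinarith

lemma lt_ceil_iff (n m k : Nat) (hm : 0 < m) : k < (n + m - 1) / m ↔ m * k < n := by
  have h2 := lt_steps_iff (n : Int) (m : Int) (k : Int) (by exact_mod_cast hm)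
  rw [ceil_steps n m hm] at h2
  constructor
  · intro hk
    have hi : (k : Int) * m < n := h2.mp (by exact_mod_cast hk)
    have : ((m * k : Nat) : Int) < (n : Int) := by push_cast; linarith
    exact_mod_cast this
  · intro hk
    have hi : (k : Int) * (m : Int) < n := by
      have : ((m * k : Nat) : Int) < (n : Int) := by exact_mod_cast hk
      push_cast at this; linarith
    exact_mod_cast h2.mpr hi

lemma ceil_le (n m : Nat) (hm : 0 < m) : (n + m - 1) / m ≤ n := by
  rcases Nat.eq_zero_or_pos n with rfl | hn
  · simp [Nat.div_eq_of_lt (by omega : m - 1 < m)]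
  · by_contra hc
    rw [not_le] at hc
    have h1 : m * n < n := (lt_ceil_iff n m n hm).mp hc
    have h2 : n ≤ m * n := Nat.le_mul_of_pos_left n hm
    exact absurd h1 (not_lt.mpr h2)

lemma filterMap_eq_map_of {α β : Type} (l : List α) (f : α → Option β) (g : α → β)
    (h : ∀ x ∈ l, f x = some (g x)) : l.filterMap f = l.map g := by
  induction l with
  | nil => rfl
  | cons a t ih =>
    simp only [List.filterMap_cons, h a (by simp), List.map_cons]
    rw [ih (fun x hx => h x (by simp [hx]))]

-- Python str.count with a single-character needle counts that character
lemma count_go_singleton (c : Char) :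
    ∀ (fuel : Nat) (l : List Char) (acc : Nat), l.length ≤ fuel →
      PySem.Chars.count.go [c] fuel l acc = acc + l.count c := by
  intro fuel
  induction fuel with
  | zero =>
    intro l acc hl
    have : l = [] := List.length_eq_zero_iff.mp (by omega)
    subst this
    simp [PySem.Chars.count.go]
  | succ fuel ih =>
    intro l acc hl
    cases l with
    | nil => simp [PySem.Chars.count.go]
    | cons a t =>
      rw [PySem.Chars.count.go]
      by_cases hc : c = a
      · subst hc
        simp only [List.isPrefixOf, BEq.rfl, Bool.and_self, if_pos]
        rw [ih _ _ (by simpa using Nat.le_of_succ_le_succ hl)]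
        simp only [List.length_cons, List.length_nil, List.drop_succ_cons, List.drop_zero,
          List.count_cons, BEq.rfl, if_pos]
        omega
      · have hpre : [c].isPrefixOf (a :: t) = false := by
          simp [List.isPrefixOf, hc]
        rw [hpre]
        simp only [Bool.false_eq_true, if_false]
        rw [ih _ _ (by simpa using Nat.le_of_succ_le_succ hl)]
        simp [Ne.symm hc]

lemma count_singleton (c : Char) (l : List Char) :
    PySem.Chars.count l [c] = l.count c := by
  unfold PySem.Chars.count
  simp only [List.isEmpty_cons, Bool.false_eq_true, if_false]
  simpa using count_go_singleton c l.length l 0 le_rfl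

lemma getD_eq_of_lt {β : Type} (l : List β) (d : β) (i : Nat) (hi : i < l.length) :
    l.getD i d = l[i] := by
  rw [List.getD_eq_getElem?_getD, List.getElem?_eq_getElem hi]
  rfl

-- a positive-step full slice is the list of every m-th element
lemma slice?_pos_step {α : Type} (xs : List α) (d : α) (m : Nat) (hm : 0 < m) (hx : xs ≠ []) :
    PySem.List.slice? xs none none (m : Int) =
      some ((List.range ((xs.length + m - 1) / m)).map (fun k => xs.getD (m * k) d)) := by
  simp [PySem.List.slice?, PySem.List.sliceIndices,
    not_lt.mpr (by positivity : (0:Int) ≤ (m:Int)), hm, List.length_pos_iff.mpr hx]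
  refine ⟨by omega, ?_⟩
  have hN : (((xs.length : Int) + (m : Int) - 1) / (m : Int)).toNat = (xs.length + m - 1) / m := by
    have h1 : ((xs.length : Int) + (m : Int) - 1) = ((xs.length + m - 1 : Nat) : Int) := by omega
    rw [h1]
    exact_mod_cast rfl
  rw [hN]
  apply filterMap_eq_map_of
  intro k hk
  have hk' : m * k < xs.length := (lt_ceil_iff _ _ _ hm).mp (List.mem_range.mp hk)
  rw [show ((m : Int) * (k : Int)).toNat = m * k from by rw [← Nat.cast_mul]; omega]
  rw [List.getElem?_eq_getElem hk']
  simp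

-- ===== VERDICT (by name: the statement is the Claim_ definition above) =====
theorem check_trees_hit_spec : Claim_equal_check_trees_hit := by
  intro fa h v _ hpre
  unfold Spec_check_trees_hit
  unfold Pre_check_trees_hit at hpre
  by_cases hfa : fa = []
  · subst hfa
    unfold check_trees_hit check_trees_hit_alt
    simp [check_trees_hit_go]
  · rw [List.isEmpty_eq_false_iff.mpr hfa] at hpre
    simp only [Bool.false_or, Bool.and_eq_true, decide_eq_true_eq] at hpre
    obtain ⟨⟨hv0, hw⟩, hall⟩ := hpre
    lift v to ℕ using hv0.le with m hm'
    have hm : 0 < m := by exact_mod_cast hv0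
    simp only [Int.toNat_natCast] at hall
    have hw' : (0:Int) < ((fa.headD "").toList.length : Int) := by exact_mod_cast hw
    have hNn : (fa.length + m - 1) / m ≤ fa.length := ceil_le fa.length m hm
    -- the per-step facts, for every visited step k
    have hfact : ∀ k : Nat, k < (fa.length + m - 1) / m →
        (PySem.List.pyGet? fa ((k : Int) * (m : Int))).getD "" = fa.getD (m * k) "" ∧
        PySem.List.pyGet? (fa.getD (m * k) "").toList
            (PySem.Int.mod ((k : Int) * h) ((fa.headD "").toList.length : Int))
          = some ((fa.getD (m * k) "").toList.getD
              (PySem.Int.mod ((k : Int) * h) ((fa.headD "").toList.length : Int)).toNat ' ') := by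
      intro k hkN
      have hkm : m * k < fa.length := (lt_ceil_iff fa.length m k hm).mp hkN
      have hkn : k < fa.length := lt_of_lt_of_le hkN hNn
      constructor
      · rw [show (k : Int) * (m : Int) = ((m * k : Nat) : Int) from by push_cast; ring,
          PySem.List.pyGet?_natCast, List.getElem?_eq_getElem hkm]
        simp [List.getD_eq_getElem?_getD, List.getElem?_eq_getElem hkm]
      · have hgk := List.all_eq_true.mp hall k (List.mem_range.mpr hkn)
        simp only [Bool.or_eq_true, Bool.not_eq_true', decide_eq_false_iff_not,
          decide_eq_true_eq, not_lt] at hgk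
        rcases hgk with hbad | hgood
        · exact absurd hbad (not_le.mpr (by rw [Nat.mul_comm]; exact hkm))
        · rw [Nat.mul_comm k m] at hgood
          have h0 : 0 ≤ PySem.Int.mod ((k : Int) * h) ((fa.headD "").toList.length : Int) :=
            PySem.Int.mod_nonneg _ hw'
          rw [PySem.List.pyGet?_of_nonneg _ h0, List.getElem?_eq_getElem hgood]
          exact congrArg some (getD_eq_of_lt _ ' ' _ hgood).symm
    -- A's loop as a sum over the visited steps
    have hA : check_trees_hit fa h (m : Int)
        = ((List.range ((fa.length + m - 1) / m)).map (fun k =>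
            if (fa.getD (m * k) "").toList.getD
                (PySem.Int.mod ((k : Int) * h) ((fa.headD "").toList.length : Int)).toNat ' ' = '#'
            then (1 : Int) else 0)).sum := by
      have hvm : (0:Int) < (m : Int) := by exact_mod_cast hm
      have hmain := loop_eq fa h (m : Int) hvm hw' (fa.length + 1) 0 0
        (by
          have := steps_le (fa.length : Int) (m : Int) (by positivity) hvm
          push_cast
          omega)
      have hmod0 : PySem.Int.mod 0 ((fa.headD "").toList.length : Int) = 0 := by
        rw [PySem.Int.mod_eq_emod_of_pos hw']; simp
      simp only [Nat.cast_zero, zero_mul, hmod0, zero_add] at hmain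
      unfold check_trees_hit
      rw [hmain, ceil_steps fa.length m hm, PySem.List.pyRange_zero_natCast, List.map_map]
      refine congrArg List.sum (List.map_congr_left ?_)
      intro k hk
      obtain ⟨hrow, hsome⟩ := hfact k (List.mem_range.mp hk)
      simp only [Function.comp_apply, hrow, hsome]
      simp
    -- B's staged passes: slice, path, count
    have hB : check_trees_hit_alt fa h (m : Int)
        = ((List.count '#' ((List.range ((fa.length + m - 1) / m)).map (fun k =>
            (fa.getD (m * k) "").toList.getD
              (PySem.Int.mod ((k : Int) * h) ((fa.headD "").toList.length : Int)).toNat ' ')) : Nat) : Int) := by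
      unfold check_trees_hit_alt
      rw [if_neg hfa]
      simp only [slice?_pos_step fa "" m hm hfa, Option.getD_some,
        PySem.List.enumerate_eq_map_pyRange
          ((List.range ((fa.length + m - 1) / m)).map (fun k => fa.getD (m * k) "")) "",
        PySem.List.len_eq, List.length_map, List.length_range,
        PySem.List.pyRange_zero_natCast, List.map_map, count_singleton]
      refine congrArg (fun x : Nat => (x : Int)) (congrArg (List.count '#') (List.map_congr_left ?_))
      intro k hk
      have hkN := List.mem_range.mp hk
      have hL : PySem.List.pyGetD
          ((List.range ((fa.length + m - 1) / m)).map (fun k => fa.getD (m * k) "")) ((k : Nat) : Int) ""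
          = fa.getD (m * k) "" := by
        rw [PySem.List.pyGetD_natCast, List.getD_eq_getElem?_getD, List.getElem?_map,
          List.getElem?_range hkN]
        simp
      simp only [Function.comp_apply, hL]
      rw [(hfact k hkN).2]
      simp
    rw [hA, hB, List.count_eq_countP, List.countP_map]
    rw [show (fun k => if (fa.getD (m * k) "").toList.getD
            (PySem.Int.mod ((k : Int) * h) ((fa.headD "").toList.length : Int)).toNat ' ' = '#'
          then (1 : Int) else 0)
        = (fun k => if ((fun x => x == '#') ∘ fun k =>
            (fa.getD (m * k) "").toList.getD
              (PySem.Int.mod ((k : Int) * h) ((fa.headD "").toList.length : Int)).toNat ' ') k = true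
          then (1 : Int) else 0) from by funext k; simp [Function.comp]]
    exact PySem.List.sum_map_ite_one_zero _ _
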